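-- pv_equiv track=rewrite | github.com/polkmn222/D4 | development/db/seeds/seed_mass_patterns_phase304.py | map_intent_and_object
-- ===== SOURCE A (Python) =====
-- def map_intent_and_object(prompt):
--     p_low = prompt.lower()
--
--     # Default
--     intent = "QUERY"
--     obj = "lead"
--
--     # Object detection
--     if "contact" in p_low: obj = "contact"
--     elif "opportunit" in p_low or "oppty" in p_low or "opty" in p_low: obj = "opportunity"
--     elif "brand" in p_low: obj = "brand"
--     elif "model" in p_low: obj = "model"
--     elif "product" in p_low: obj = "product"
--     elif "asset" in p_low: obj = "asset"
--     elif "template" in p_low or "tmpl" in p_low: obj = "message_template"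
--
--     # Intent detection
--     if any(k in p_low for k in ["create", "add", "new", "make"]):
--         intent = "OPEN_FORM"
--     elif any(k in p_low for k in ["edit", "update", "change", "fix", "tweak"]):
--         intent = "UPDATE"
--     elif any(k in p_low for k in ["delete", "remove", "nuke"]):
--         intent = "DELETE"
--     elif any(k in p_low for k in ["show", "list", "all", "view", "find", "search", "pull", "who"]):
--         intent = "QUERY"
--
--     return intent, obj
-- ===== SOURCE B (Python) =====
-- OBJ_GROUPS = [
--     ("contact", ["contact"]),
--     ("opportunity", ["opportunit", "oppty", "opty"]),
--     ("brand", ["brand"]),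
--     ("model", ["model"]),
--     ("product", ["product"]),
--     ("asset", ["asset"]),
--     ("message_template", ["template", "tmpl"]),
-- ]
--
-- INTENT_GROUPS = [
--     ("OPEN_FORM", ["create", "add", "new", "make"]),
--     ("UPDATE", ["edit", "update", "change", "fix", "tweak"]),
--     ("DELETE", ["delete", "remove", "nuke"]),
--     ("QUERY", ["show", "list", "all", "view", "find", "search", "pull", "who"]),
-- ]
--
-- ALL_KEYWORDS = [kw for _, kws in OBJ_GROUPS + INTENT_GROUPS for kw in kws]
--
--
-- def _pick(hits, groups, default):
--     for label, kws in groups: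
--         if any(k in hits for k in kws):
--             return label
--     return default
--
--
-- def map_intent_and_object(prompt):
--     # One left-to-right scan over the text: at each position collect every
--     # keyword that starts there into a hit set, then select labels from it.
--     p_low = prompt.lower()
--     hits = set()
--     for i in range(len(p_low)):
--         for kw in ALL_KEYWORDS:
--             if p_low.startswith(kw, i):
--                 hits.add(kw)
--     return _pick(hits, INTENT_GROUPS, "QUERY"), _pick(hits, OBJ_GROUPS, "lead")
-- ===== Notes on version B (the rewrite author's own statement) =====
-- stated objective: alternative
-- what changed: Instead of testing each keyword for substring membership in turn, B makes one left-to-right scan over the lowered prompt collecting every keyword that starts at each position into a hit set, then selects the object and intent labels from that set via ordered group tables.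
import Mathlib
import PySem

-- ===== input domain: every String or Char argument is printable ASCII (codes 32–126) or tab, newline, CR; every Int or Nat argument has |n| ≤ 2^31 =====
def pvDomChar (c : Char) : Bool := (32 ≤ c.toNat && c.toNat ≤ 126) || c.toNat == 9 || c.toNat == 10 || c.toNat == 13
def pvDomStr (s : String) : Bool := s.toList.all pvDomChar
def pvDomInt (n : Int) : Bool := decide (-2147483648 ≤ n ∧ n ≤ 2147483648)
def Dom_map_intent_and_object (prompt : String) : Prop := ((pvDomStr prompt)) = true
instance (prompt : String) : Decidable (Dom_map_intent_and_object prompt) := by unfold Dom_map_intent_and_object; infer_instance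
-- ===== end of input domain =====

-- B replaces the per-keyword substring tests with one left-to-right scan over the prompt
-- collecting a hit set of keywords, then selects labels from that set (alternative, same cost).

-- ===== PORT A =====
def map_intent_and_object (prompt : String) : String × String :=
  let pLow := PySem.Str.lower prompt
  let obj :=
    if PySem.Str.isIn "contact" pLow then "contact"
    else if PySem.Str.isIn "opportunit" pLow || PySem.Str.isIn "oppty" pLow || PySem.Str.isIn "opty" pLow then "opportunity"
    else if PySem.Str.isIn "brand" pLow then "brand"
    else if PySem.Str.isIn "model" pLow then "model"
    else if PySem.Str.isIn "product" pLow then "product"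
    else if PySem.Str.isIn "asset" pLow then "asset"
    else if PySem.Str.isIn "template" pLow || PySem.Str.isIn "tmpl" pLow then "message_template"
    else "lead"
  let intent :=
    if ["create", "add", "new", "make"].any (fun k => PySem.Str.isIn k pLow) then "OPEN_FORM"
    else if ["edit", "update", "change", "fix", "tweak"].any (fun k => PySem.Str.isIn k pLow) then "UPDATE"
    else if ["delete", "remove", "nuke"].any (fun k => PySem.Str.isIn k pLow) then "DELETE"
    else if ["show", "list", "all", "view", "find", "search", "pull", "who"].any (fun k => PySem.Str.isIn k pLow) then "QUERY"
    else "QUERY"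
  (intent, obj)

-- ===== PORT B =====
def pvObjGroups : List (String × List String) :=
  [("contact", ["contact"]),
   ("opportunity", ["opportunit", "oppty", "opty"]),
   ("brand", ["brand"]),
   ("model", ["model"]),
   ("product", ["product"]),
   ("asset", ["asset"]),
   ("message_template", ["template", "tmpl"])]

def pvIntentGroups : List (String × List String) :=
  [("OPEN_FORM", ["create", "add", "new", "make"]),
   ("UPDATE", ["edit", "update", "change", "fix", "tweak"]),
   ("DELETE", ["delete", "remove", "nuke"]),
   ("QUERY", ["show", "list", "all", "view", "find", "search", "pull", "who"])]

def pvAllKeywords : List String := (pvObjGroups ++ pvIntentGroups).flatMap (fun g => g.2)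

def pvPick (hits : PySem.Set String) (groups : List (String × List String)) (dflt : String) : String :=
  match groups with
  | [] => dflt
  | (label, kws) :: rest =>
      if kws.any (fun k => PySem.Set.contains hits k) then label else pvPick hits rest dflt

def pvCollect (pLow : String) : PySem.Set String :=
  (PySem.List.pyRange 0 (PySem.Str.len pLow) 1).foldl
    (fun hits i =>
      pvAllKeywords.foldl
        (fun h kw =>
          -- Python's p_low.startswith(kw, i): for the 0 ≤ i ≤ len(p) produced by range(len(p_low))
          -- it is exactly startswith on the suffix slice p_low[i:] (ported by hand, exact on that domain)
          if PySem.Str.startswith (PySem.Str.slice pLow (some i) none) kw then PySem.Set.add h kw else h)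
        hits)
    PySem.Set.empty

def map_intent_and_object_alt (prompt : String) : String × String :=
  let pLow := PySem.Str.lower prompt
  let hits := pvCollect pLow
  (pvPick hits pvIntentGroups "QUERY", pvPick hits pvObjGroups "lead")

-- ===== PRECONDITION & SPEC =====
def Spec_map_intent_and_object (prompt : String) (out : String × String) : Prop := out = map_intent_and_object_alt prompt
instance (prompt : String) (out : String × String) : Decidable (Spec_map_intent_and_object prompt out) := by unfold Spec_map_intent_and_object; infer_instance

-- ===== CLAIM =====
def Claim_equal_map_intent_and_object : Prop := ∀ (prompt : String), Dom_map_intent_and_object prompt → Spec_map_intent_and_object prompt (map_intent_and_object prompt)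

-- ===== LEMMAS AND PROOFS =====

-- membership in the inner fold over the keyword list
lemma mem_inner_fold (c : String → Bool) (kws : List String) (h0 : PySem.Set String) (kw : String) :
    kw ∈ kws.foldl (fun h k => if c k then PySem.Set.add h k else h) h0 ↔
      kw ∈ h0 ∨ (kw ∈ kws ∧ c kw = true) := by
  induction kws generalizing h0 with
  | nil => simp
  | cons k rest ih =>
    simp only [List.foldl_cons]
    by_cases hk : c k = true
    · rw [if_pos hk, ih, PySem.Set.mem_add, List.mem_cons]
      constructor
      · rintro ((h | rfl) | ⟨hm, hc⟩)
        · exact Or.inl h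
        · exact Or.inr ⟨Or.inl rfl, hk⟩
        · exact Or.inr ⟨Or.inr hm, hc⟩
      · rintro (h | ⟨(rfl | hm), hc⟩)
        · exact Or.inl (Or.inl h)
        · exact Or.inl (Or.inr rfl)
        · exact Or.inr ⟨hm, hc⟩
    · rw [if_neg hk, ih, List.mem_cons]
      constructor
      · rintro (h | ⟨hm, hc⟩)
        · exact Or.inl h
        · exact Or.inr ⟨Or.inr hm, hc⟩
      · rintro (h | ⟨(rfl | hm), hc⟩)
        · exact Or.inl h
        · exact absurd hc hk
        · exact Or.inr ⟨hm, hc⟩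

-- membership in the outer fold over positions
lemma mem_outer_fold (c : Int → String → Bool) (is : List Int) (h0 : PySem.Set String) (kw : String) :
    kw ∈ is.foldl (fun hits i =>
        pvAllKeywords.foldl (fun h k => if c i k then PySem.Set.add h k else h) hits) h0 ↔
      kw ∈ h0 ∨ (kw ∈ pvAllKeywords ∧ ∃ i ∈ is, c i kw = true) := by
  induction is generalizing h0 with
  | nil => simp
  | cons i rest ih =>
    simp only [List.foldl_cons, ih, mem_inner_fold]
    constructor
    · rintro ((h | ⟨hm, hc⟩) | ⟨hm, j, hj, hc⟩)
      · exact Or.inl h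
      · exact Or.inr ⟨hm, i, List.mem_cons_self .., hc⟩
      · exact Or.inr ⟨hm, j, List.mem_cons_of_mem _ hj, hc⟩
    · rintro (h | ⟨hm, j, hj, hc⟩)
      · exact Or.inl (Or.inl h)
      · rcases List.mem_cons.mp hj with rfl | hj
        · exact Or.inl (Or.inr ⟨hm, hc⟩)
        · exact Or.inr ⟨hm, j, hj, hc⟩

-- a nonempty keyword is in the hit set iff it occurs in the prompt
lemma contains_collect (p : String) (kw : String) (hmem : kw ∈ pvAllKeywords)
    (hne : kw.toList ≠ []) :
    PySem.Set.contains (pvCollect p) kw = PySem.Str.isIn kw p := by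
  have hmemiff : kw ∈ pvCollect p ↔ PySem.Str.isIn kw p = true := by
    unfold pvCollect
    rw [mem_outer_fold (fun i k => PySem.Str.startswith (PySem.Str.slice p (some i) none) k)]
    simp only [PySem.Set.empty, List.not_mem_nil, false_or]
    rw [PySem.Str.isIn_eq, ← PySem.Chars.exists_prefix_drop_iff_isIn]
    constructor
    · rintro ⟨-, i, hi, hc⟩
      rcases PySem.List.mem_pyRange_one.mp hi with ⟨h0, _⟩
      refine ⟨i.toNat, ?_⟩
      have := (PySem.Chars.startswith_iff _ _).mp (by rw [← PySem.Str.startswith_eq]; exact hc)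
      simpa [PySem.Str.toList_slice, PySem.Chars.slice_eq_listSlice,
             PySem.List.slice_from _ h0] using this
    · rintro ⟨j, hj⟩
      have hjlt : j < p.toList.length := by
        by_contra hge
        rw [List.drop_eq_nil_of_le (by omega)] at hj
        exact hne (List.prefix_nil.mp hj)
      refine ⟨hmem, (j : Int), PySem.List.mem_pyRange_one.mpr ⟨by positivity, ?_⟩, ?_⟩
      · rw [PySem.Str.len_eq]; exact_mod_cast hjlt
      · rw [PySem.Str.startswith_eq]
        apply (PySem.Chars.startswith_iff _ _).mpr
        simpa [PySem.Str.toList_slice, PySem.Chars.slice_eq_listSlice,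
               PySem.List.slice_from _ (by positivity : (0:Int) ≤ (j:Int))] using hj
  cases hiso : PySem.Str.isIn kw p
  · rw [hiso] at hmemiff
    simp [PySem.Set.contains, List.contains_eq_mem, hmemiff]
  · simp [PySem.Set.contains, List.contains_eq_mem, hmemiff.mpr hiso]

-- ===== VERDICT (by name: the statement is the Claim_ definition above) =====
set_option maxHeartbeats 2000000 in
theorem map_intent_and_object_spec : Claim_equal_map_intent_and_object := by
  intro prompt _
  unfold Spec_map_intent_and_object
  simp only [map_intent_and_object, map_intent_and_object_alt, pvPick, pvIntentGroups, pvObjGroups,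
             List.any_cons, List.any_nil, Bool.or_false, Bool.or_assoc]
  rw [contains_collect _ "contact" (by decide) (by decide),
      contains_collect _ "opportunit" (by decide) (by decide),
      contains_collect _ "oppty" (by decide) (by decide),
      contains_collect _ "opty" (by decide) (by decide),
      contains_collect _ "brand" (by decide) (by decide),
      contains_collect _ "model" (by decide) (by decide),
      contains_collect _ "product" (by decide) (by decide),
      contains_collect _ "asset" (by decide) (by decide),
      contains_collect _ "template" (by decide) (by decide),
      contains_collect _ "tmpl" (by decide) (by decide),
      contains_collect _ "create" (by decide) (by decide),
      contains_collect _ "add" (by decide) (by decide),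
      contains_collect _ "new" (by decide) (by decide),
      contains_collect _ "edit" (by decide) (by decide),
      contains_collect _ "update" (by decide) (by decide),
      contains_collect _ "change" (by decide) (by decide),
      contains_collect _ "fix" (by decide) (by decide),
      contains_collect _ "tweak" (by decide) (by decide),
      contains_collect _ "delete" (by decide) (by decide),
      contains_collect _ "remove" (by decide) (by decide),
      contains_collect _ "nuke" (by decide) (by decide),
      contains_collect _ "show" (by decide) (by decide),
      contains_collect _ "list" (by decide) (by decide),
      contains_collect _ "all" (by decide) (by decide),
      contains_collect _ "view" (by decide) (by decide),
      contains_collect _ "find" (by decide) (by decide),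
      contains_collect _ "search" (by decide) (by decide),
      contains_collect _ "pull" (by decide) (by decide),
      contains_collect _ "who" (by decide) (by decide),
      contains_collect _ "make" (by decide) (by decide)]
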